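-- pv_equiv track=rewrite | github.com/vcapra1/jubilee | scripts/Jubilee.py | execute
-- ===== SOURCE A (Python) =====
-- from typing import List, Tuple
--
-- def execute(data: List[str]) -> List[str]:
--     data_modified = []
--
--     initial_tool_nr = -1
--     initial_bed_temp = 0
--     initial_tool_temps = {}
--
--     for index, layer in enumerate(data):
--         lines = layer.split("\n")
--         lines_modified = []
--
--         if index == 0:
--             # This is the header data, should be Marlin
--             if lines[0] != ";FLAVOR:Marlin":
--                 # Not Marlin, stop now (return original code with separators for debugging)
--                 return list(map(lambda x: ";;;;;;\n" + x + "\n;;;;;;\n", data))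
--
--             # Just copy all these lines over
--             lines_modified = lines
--
--         elif index == 1:
--             # This is the first non-header layer, add a T-1 and check for first T# command
--             lines_modified.append("T-1 ; park any currently active tool")
--             found = False
--             for line in lines:
--                 if not found and line.startswith("T"):
--                     found = True
--                     initial_tool_nr = int(line[1:])
--
--                 elif found and (line.startswith("M104") or line.startswith("M109")):
--                     parts = line.split(" ")
--                     tool = initial_tool_nr
--                     temp = 0
--                     for part in parts:
--                         if part.startswith("T"):
--                             tool = int(part[1:])
--                         elif part.startswith("S"):
--                             temp = int(part[1:])
--                     if tool not in initial_tool_temps: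
--                         initial_tool_temps[tool] = temp
--
--                 elif line.startswith("M140") or line.startswith("M190"):
--                     parts = line.split(" ")
--                     temp = 0
--                     for part in parts:
--                         if part.startswith("S"):
--                             temp = int(part[1:])
--                     if initial_bed_temp == 0:
--                         initial_bed_temp = temp
--
--                 elif "M105" in line:
--                     pass
--
--                 elif "PROGRAM_START" in line:
--                     # Add the temp stuff
--                     if initial_bed_temp > 0:
--                         lines_modified.append("M140 S{} ; heat the bed".format(initial_bed_temp))
--
--                     for tool in initial_tool_temps:
--                         lines_modified.append("M104 T{} S{} ; heat tool".format(tool, initial_tool_temps[tool]))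
--
--                     if initial_bed_temp > 0:
--                         lines_modified.append("M190 S{} ; wait for bed to finish heating".format(initial_bed_temp))
--                         lines_modified.append("G4 S60 ; wait an additional 60 seconds to allow plate to finish thermally expanding")
--
--                     lines_modified.append("G28 ; home after bed has reached temperature")
--
--                     lines_modified.append("T{} ; select first tool".format(initial_tool_nr))
--
--                 else:
--                     # No need to modify, so just copy this line over
--                     lines_modified.append(line)
--
--         elif index == len(data) - 1:
--             # This is the very last "layer"
--             lines_modified = lines
--
--             lines_modified.append("M0")
--
--         else:
--             lines_modified = lines
--
--         data_modified.append("\n".join(lines_modified) + "\n")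
--
--     return data_modified
-- ===== SOURCE B (Python) =====
-- from typing import List
--
--
-- def _bed_before(prefix: List[str]) -> int:
--     # first nonzero S-temperature among M140/M190 lines of the prefix
--     for line in prefix:
--         if line.startswith("M140") or line.startswith("M190"):
--             temp = 0
--             for part in line.split(" "):
--                 if part.startswith("S"):
--                     temp = int(part[1:])
--             if temp != 0:
--                 return temp
--     return 0
--
--
-- def _temps_before(prefix: List[str], tidx: int, tool_nr: int) -> dict:
--     # first-seen S-temperature per tool from M104/M109 lines after the first tool-select line
--     temps = {}
--     for i, line in enumerate(prefix):
--         if i > tidx and (line.startswith("M104") or line.startswith("M109")):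
--             tool, temp = tool_nr, 0
--             for part in line.split(" "):
--                 if part.startswith("T"):
--                     tool = int(part[1:])
--                 elif part.startswith("S"):
--                     temp = int(part[1:])
--             temps.setdefault(tool, temp)
--     return temps
--
--
-- def _tool_at(lines: List[str], tidx: int, i: int) -> int:
--     # the selected tool number as of line i: -1 until the first tool-select line has passed
--     return int(lines[tidx][1:]) if tidx < i else -1
--
--
-- def _first_layer(layer: str) -> str:
--     lines = layer.split("\n")
--     tidx = next((i for i, l in enumerate(lines) if l.startswith("T")), len(lines))
--     out = ["T-1 ; park any currently active tool"]
--     for i, line in enumerate(lines):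
--         if i == tidx:
--             pass  # the first tool-select line is consumed
--         elif i > tidx and (line.startswith("M104") or line.startswith("M109")):
--             pass  # consumed into the temp table
--         elif line.startswith("M140") or line.startswith("M190"):
--             pass  # consumed into the bed temperature
--         elif "M105" in line:
--             pass
--         elif "PROGRAM_START" in line:
--             tool = _tool_at(lines, tidx, i)
--             bed = _bed_before(lines[:i])
--             temps = _temps_before(lines[:i], tidx, tool)
--             if bed > 0:
--                 out.append("M140 S{} ; heat the bed".format(bed))
--             for t in temps:
--                 out.append("M104 T{} S{} ; heat tool".format(t, temps[t]))
--             if bed > 0: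
--                 out.append("M190 S{} ; wait for bed to finish heating".format(bed))
--                 out.append("G4 S60 ; wait an additional 60 seconds to allow plate to finish thermally expanding")
--             out.append("G28 ; home after bed has reached temperature")
--             out.append("T{} ; select first tool".format(tool))
--         else:
--             out.append(line)
--     return "\n".join(out) + "\n"
--
--
-- def execute(data: List[str]) -> List[str]:
--     if not data:
--         return []
--     if data[0].split("\n")[0] != ";FLAVOR:Marlin":
--         return [";;;;;;\n" + x + "\n;;;;;;\n" for x in data]
--     out = [data[0] + "\n"]
--     if len(data) > 1:
--         out.append(_first_layer(data[1]))
--         middle = data[2:]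
--         out.extend(layer + "\n" for layer in middle[:-1])
--         if middle:
--             out.append(middle[-1] + "\nM0\n")
--     return out
-- ===== Notes on version B (the rewrite author's own statement) =====
-- stated objective: alternative
-- what changed: A threads mutable state (found flag, tool, bed, first-seen temp dict) through one stateful pass over the first layer; B instead precomputes the index of the first tool-select line, classifies every line statelessly against that index (keep/drop), and recomputes the splice data (bed temp, per-tool temps, tool number) on demand from the line's prefix at each PROGRAM_START; the top level dispatches by pattern on header/first/middle/last layers instead of A's indexed enumerate loop.
import Mathlib
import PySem

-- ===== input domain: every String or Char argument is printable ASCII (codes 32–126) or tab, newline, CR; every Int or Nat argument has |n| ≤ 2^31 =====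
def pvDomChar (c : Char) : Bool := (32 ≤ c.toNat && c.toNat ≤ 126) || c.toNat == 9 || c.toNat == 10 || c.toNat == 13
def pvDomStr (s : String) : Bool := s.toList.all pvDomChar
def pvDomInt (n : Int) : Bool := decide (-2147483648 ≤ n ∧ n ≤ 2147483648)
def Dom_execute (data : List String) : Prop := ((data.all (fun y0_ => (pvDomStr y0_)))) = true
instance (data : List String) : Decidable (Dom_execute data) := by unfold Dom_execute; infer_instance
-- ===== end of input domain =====

-- B replaces A's single stateful pass over the first layer (found flag, threaded tool/bed/temps)
-- by a stateless per-line classification against the precomputed index of the first tool-select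
-- line, recomputing the spliced temp data from the line's prefix at each PROGRAM_START, and the
-- top level dispatches by pattern on header/first/middle/last layers (objective: alternative).

-- shared primitives (identical Python fragments in both programs: split, int(), s[1:], part scans, the spliced block)
def pvSplit (s sep : String) : List String := (PySem.Str.split? s sep).getD []
def pvParseInt (s : String) : Int := (PySem.Int.ofStr? s).getD 0
def pvTail1 (s : String) : String := PySem.Str.slice s (some 1) none
def pvToolScan (parts : List String) (tool0 : Int) : Int × Int :=
  parts.foldl (fun tt part =>
    if PySem.Str.startswith part "T" then (pvParseInt (pvTail1 part), tt.2)
    else if PySem.Str.startswith part "S" then (tt.1, pvParseInt (pvTail1 part))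
    else tt) (tool0, 0)
def pvBedScan (parts : List String) : Int :=
  parts.foldl (fun temp part =>
    if PySem.Str.startswith part "S" then pvParseInt (pvTail1 part) else temp) 0
def pvSplice (bed : Int) (temps : PySem.Dict Int Int) (tool : Int) : List String :=
  (if bed > 0 then ["M140 S" ++ PySem.Int.toStr bed ++ " ; heat the bed"] else [])
  ++ temps.items.map (fun p => "M104 T" ++ PySem.Int.toStr p.1 ++ " S" ++ PySem.Int.toStr p.2 ++ " ; heat tool")
  ++ (if bed > 0 then
        ["M190 S" ++ PySem.Int.toStr bed ++ " ; wait for bed to finish heating",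
         "G4 S60 ; wait an additional 60 seconds to allow plate to finish thermally expanding"]
      else [])
  ++ ["G28 ; home after bed has reached temperature"]
  ++ ["T" ++ PySem.Int.toStr tool ++ " ; select first tool"]

-- ===== PORT A =====
structure ASt where
  lm : List String
  found : Bool
  tool : Int
  bed : Int
  temps : PySem.Dict Int Int

def aStep (st : ASt) (line : String) : ASt :=
  if !st.found && PySem.Str.startswith line "T" then
    { st with found := true, tool := pvParseInt (pvTail1 line) }
  else if st.found && (PySem.Str.startswith line "M104" || PySem.Str.startswith line "M109") then
    let tt := pvToolScan (pvSplit line " ") st.tool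
    { st with temps := if st.temps.contains tt.1 then st.temps else st.temps.insert tt.1 tt.2 }
  else if PySem.Str.startswith line "M140" || PySem.Str.startswith line "M190" then
    let temp := pvBedScan (pvSplit line " ")
    if st.bed == 0 then { st with bed := temp } else st
  else if PySem.Str.isIn "M105" line then st
  else if PySem.Str.isIn "PROGRAM_START" line then
    { st with lm := st.lm ++ pvSplice st.bed st.temps st.tool }
  else
    { st with lm := st.lm ++ [line] }

def aGo (n : Nat) : Nat → Int → Int → PySem.Dict Int Int → List String → Option (List String)
  | _, _, _, _, [] => some []
  | i, tool, bed, temps, layer :: rest =>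
    let lines := pvSplit layer "\n"
    if i = 0 then
      if lines.headD "" ≠ ";FLAVOR:Marlin" then none
      else
        match aGo n (i+1) tool bed temps rest with
        | none => none
        | some r => some ((PySem.Str.join "\n" lines ++ "\n") :: r)
    else if i = 1 then
      let st := lines.foldl aStep ⟨["T-1 ; park any currently active tool"], false, tool, bed, temps⟩
      match aGo n (i+1) st.tool st.bed st.temps rest with
      | none => none
      | some r => some ((PySem.Str.join "\n" st.lm ++ "\n") :: r)
    else if i = n - 1 then
      match aGo n (i+1) tool bed temps rest with
      | none => none
      | some r => some ((PySem.Str.join "\n" (lines ++ ["M0"]) ++ "\n") :: r)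
    else
      match aGo n (i+1) tool bed temps rest with
      | none => none
      | some r => some ((PySem.Str.join "\n" lines ++ "\n") :: r)

def execute (data : List String) : List String :=
  match aGo data.length 0 (-1) 0 PySem.Dict.empty data with
  | none => data.map (fun x => ";;;;;;\n" ++ x ++ "\n;;;;;;\n")
  | some r => r

-- ===== PORT B =====
-- _bed_before: first nonzero S-temperature among M140/M190 lines of the prefix
def bBed : List String → Int
  | [] => 0
  | line :: rest =>
    if PySem.Str.startswith line "M140" || PySem.Str.startswith line "M190" then
      let temp := pvBedScan (pvSplit line " ")
      if temp ≠ 0 then temp else bBed rest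
    else bBed rest

-- _tool_at: lines[tidx] is in range whenever tidx < i (so .toNat/getD is exact here)
def bTool (lines : List String) (tidx i : Int) : Int :=
  if tidx < i then pvParseInt (pvTail1 (lines.getD tidx.toNat "")) else -1

-- _temps_before: first-seen S-temperature per tool from M104/M109 lines after index tidx
def bTempStep (tidx tn : Int) (d : PySem.Dict Int Int) (il : Int × String) : PySem.Dict Int Int :=
  if tidx < il.1 && (PySem.Str.startswith il.2 "M104" || PySem.Str.startswith il.2 "M109") then
    let tt := pvToolScan (pvSplit il.2 " ") tn
    d.setdefault tt.1 tt.2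
  else d

def bTemps (pre : List String) (tidx tn : Int) : PySem.Dict Int Int :=
  (PySem.List.enumerate pre).foldl (bTempStep tidx tn) PySem.Dict.empty

-- one line of the first layer: drop the consumed lines, splice at PROGRAM_START, copy the rest
-- (lines[:i] with 0 ≤ i is List.take; the enumerate index i is always ≥ 0)
def bLineStep (lines : List String) (tidx : Int) (out : List String) (il : Int × String) : List String :=
  if il.1 == tidx then out
  else if tidx < il.1 && (PySem.Str.startswith il.2 "M104" || PySem.Str.startswith il.2 "M109") then out
  else if PySem.Str.startswith il.2 "M140" || PySem.Str.startswith il.2 "M190" then out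
  else if PySem.Str.isIn "M105" il.2 then out
  else if PySem.Str.isIn "PROGRAM_START" il.2 then
    out ++ pvSplice (bBed (lines.take il.1.toNat))
            (bTemps (lines.take il.1.toNat) tidx (bTool lines tidx il.1))
            (bTool lines tidx il.1)
  else out ++ [il.2]

-- next((i for i, l in enumerate(lines) if l.startswith("T")), len(lines)) = List.findIdx (length when no match)
def bFirstLayer (layer : String) : String :=
  let lines := pvSplit layer "\n"
  let tidx : Int := (lines.findIdx (fun l => PySem.Str.startswith l "T") : Int)
  PySem.Str.join "\n"
    ((PySem.List.enumerate lines).foldl (bLineStep lines tidx)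
      ["T-1 ; park any currently active tool"]) ++ "\n"

def execute_alt (data : List String) : List String :=
  match data with
  | [] => []
  | h :: rest =>
    if (pvSplit h "\n").headD "" ≠ ";FLAVOR:Marlin" then
      data.map (fun x => ";;;;;;\n" ++ x ++ "\n;;;;;;\n")
    else
      (h ++ "\n") ::
        match rest with
        | [] => []
        | f :: middle =>
          bFirstLayer f ::
            (middle.dropLast.map (fun l => l ++ "\n") ++
              match middle.getLast? with
              | none => []
              | some l => [l ++ "\nM0\n"])

-- ===== PRECONDITION & SPEC =====
-- Pre_ excludes exactly the inputs on which A raises ValueError from int(): a malformed first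
-- tool-select line in the first non-header layer, or a malformed T/S field of a temperature line
-- that A parses (M140/M190 anywhere in that layer; M104/M109 after the first tool-select line).
def pvOkInt (s : String) : Bool := (PySem.Int.ofStr? (pvTail1 s)).isSome
def pvLineOkBed (line : String) : Bool :=
  !(PySem.Str.startswith line "M140" || PySem.Str.startswith line "M190") ||
    (pvSplit line " ").all (fun part => !PySem.Str.startswith part "S" || pvOkInt part)
def pvLineOkTool (line : String) : Bool :=
  !(PySem.Str.startswith line "M104" || PySem.Str.startswith line "M109") ||
    (pvSplit line " ").all (fun part =>
      !(PySem.Str.startswith part "T" || PySem.Str.startswith part "S") || pvOkInt part)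
def Pre_execute (data : List String) : Prop :=
  (match data with
   | _ :: f :: _ =>
     !((pvSplit (data.headD "") "\n").headD "" == ";FLAVOR:Marlin") ||
       ((pvSplit f "\n").all pvLineOkBed &&
        (match (pvSplit f "\n").dropWhile (fun l => !PySem.Str.startswith l "T") with
         | [] => true
         | t :: rest => pvOkInt t && rest.all pvLineOkTool))
   | _ => true) = true
instance (data : List String) : Decidable (Pre_execute data) := by unfold Pre_execute; infer_instance

def pvWitness_execute : List String :=
  [";FLAVOR:Marlin\n;Generated", "T0\nM105\nM104 S200\n; PROGRAM_START\nM140 S60\nT1\nM109 T1 S210\nG1 X1", "G1 Y2", ";End"]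

def Spec_execute (data : List String) (out : List String) : Prop := out = execute_alt data
instance (data : List String) (out : List String) : Decidable (Spec_execute data out) := by unfold Spec_execute; infer_instance

-- ===== CLAIM (what is proved, stated in full; the proofs are below) =====
def Claim_equal_execute : Prop := ∀ (data : List String), Dom_execute data → Pre_execute data → Spec_execute data (execute data)

-- ===== LEMMAS AND PROOFS =====

theorem join_append_singleton (sep y : List Char) : ∀ (xs : List (List Char)), xs ≠ [] →
    PySem.Chars.join sep (xs ++ [y]) = PySem.Chars.join sep xs ++ sep ++ y
  | [], h => absurd rfl h
  | [x], _ => by rw [List.singleton_append, PySem.Chars.join_cons_cons, PySem.Chars.join_singleton, PySem.Chars.join_singleton]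
  | x :: x' :: xs, _ => by
    rw [List.cons_append, List.cons_append, PySem.Chars.join_cons_cons, ← List.cons_append,
      join_append_singleton sep y (x' :: xs) (by simp), PySem.Chars.join_cons_cons]
    simp [List.append_assoc]

theorem join_two (sep u v : List Char) : ∀ (xs : List (List Char)),
    PySem.Chars.join sep (xs ++ [u, v]) = PySem.Chars.join sep (xs ++ [u ++ sep ++ v])
  | [] => by
    rw [List.nil_append, List.nil_append, PySem.Chars.join_cons_cons,
      PySem.Chars.join_singleton, PySem.Chars.join_singleton]
  | [x] => by
    rw [List.singleton_append, List.singleton_append, PySem.Chars.join_cons_cons,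
      PySem.Chars.join_cons_cons, PySem.Chars.join_cons_cons, PySem.Chars.join_singleton,
      PySem.Chars.join_singleton]
  | x :: x' :: xs => by
    rw [List.cons_append, List.cons_append, List.cons_append, List.cons_append,
      PySem.Chars.join_cons_cons, ← List.cons_append, join_two sep u v (x' :: xs),
      List.cons_append, PySem.Chars.join_cons_cons]

theorem go_join (sep : List Char) (hsep : sep ≠ []) :
    ∀ (fuel : Nat) (l cur : List Char) (acc : List (List Char)), l.length < fuel →
    PySem.Chars.join sep (PySem.Chars.splitOn.go sep fuel l cur acc) =
      PySem.Chars.join sep (acc.reverse ++ [cur.reverse ++ l])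
  | 0, l, cur, acc, h => by omega
  | fuel+1, [], cur, acc, h => by
    unfold PySem.Chars.splitOn.go
    simp
  | fuel+1, c :: rest, cur, acc, h => by
    unfold PySem.Chars.splitOn.go
    by_cases hp : sep.isPrefixOf (c :: rest) = true
    · rw [if_pos hp]
      rw [go_join sep hsep fuel _ [] (cur.reverse :: acc)
        (by
          have := List.IsPrefix.length_le (List.isPrefixOf_iff_prefix.mp hp)
          have hs : 1 ≤ sep.length := by cases sep with | nil => exact absurd rfl hsep | cons a b => simp
          simp only [List.length_drop]
          simp at h ⊢
          omega)]
      have hl : sep ++ List.drop sep.length (c :: rest) = c :: rest :=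
        List.prefix_iff_eq_append.mp (List.isPrefixOf_iff_prefix.mp hp)
      rw [List.reverse_cons, List.reverse_nil, List.nil_append, List.append_assoc]
      have : ([cur.reverse] ++ [List.drop sep.length (c :: rest)] : List (List Char)) = [cur.reverse, List.drop sep.length (c :: rest)] := rfl
      rw [this, join_two]
      rw [List.append_assoc, hl]
    · rw [if_neg hp]
      rw [go_join sep hsep fuel rest (c :: cur) acc (by simp at h ⊢; omega)]
      simp [List.append_assoc]

theorem join_splitOn (s sep : List Char) (hsep : sep ≠ []) :
    PySem.Chars.join sep (PySem.Chars.splitOn s sep) = s := by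
  unfold PySem.Chars.splitOn
  rw [go_join sep hsep (s.length+1) s [] [] (by omega)]
  simp [PySem.Chars.join_singleton]

theorem go_ne_nil (sep : List Char) :
    ∀ (fuel : Nat) (l cur : List Char) (acc : List (List Char)),
      PySem.Chars.splitOn.go sep fuel l cur acc ≠ []
  | 0, l, cur, acc => by unfold PySem.Chars.splitOn.go; simp
  | fuel+1, [], cur, acc => by unfold PySem.Chars.splitOn.go; simp
  | fuel+1, c :: rest, cur, acc => by
    unfold PySem.Chars.splitOn.go
    by_cases hp : sep.isPrefixOf (c :: rest) = true
    · rw [if_pos hp]; exact go_ne_nil sep fuel _ [] _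
    · rw [if_neg hp]; exact go_ne_nil sep fuel rest (c :: cur) acc

theorem splitOn_ne_nil (s sep : List Char) : PySem.Chars.splitOn s sep ≠ [] := by
  unfold PySem.Chars.splitOn; exact go_ne_nil sep (s.length+1) s [] []

theorem pvSplit_eq (s : String) :
    pvSplit s "\n" = List.map String.ofList (PySem.Chars.splitOn s.toList ['\n']) := by
  simp [pvSplit, PySem.Str.split?, PySem.Chars.split?]

theorem pv_join_map_ofList (parts : List (List Char)) :
    PySem.Str.join "\n" (List.map String.ofList parts) =
      String.ofList (PySem.Chars.join ['\n'] parts) := by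
  simp [PySem.Str.join, List.map_map, Function.comp_def, String.toList_ofList]

-- join "\n" inverts split: Python's "\n".join(s.split("\n")) == s
theorem pv_join_split (s : String) : PySem.Str.join "\n" (pvSplit s "\n") = s := by
  rw [pvSplit_eq, pv_join_map_ofList, join_splitOn s.toList ['\n'] (by simp),
    String.ofList_toList]

-- join of xs ++ ["M0"]
theorem pv_join_append_M0 (s : String) :
    PySem.Str.join "\n" (pvSplit s "\n" ++ ["M0"]) = s ++ "\nM0" := by
  have h1 : (["M0"] : List String) = List.map String.ofList [['M','0']] := rfl
  rw [pvSplit_eq, h1, ← List.map_append, pv_join_map_ofList,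
    join_append_singleton ['\n'] ['M','0'] _ (splitOn_ne_nil s.toList ['\n']),
    join_splitOn s.toList ['\n'] (by simp), List.append_assoc, String.ofList_append,
    String.ofList_toList]
  rfl

-- A's `if tool not in temps: temps[tool] = temp` is dict.setdefault
theorem pv_setdefault (d : PySem.Dict Int Int) (k v : Int) :
    (if d.contains k then d else d.insert k v) = d.setdefault k v := by
  by_cases h : d.contains k
  · rw [if_pos h, PySem.Dict.setdefault_of_contains d v h]
  · rw [if_neg h, PySem.Dict.setdefault_of_not_contains d v (by simpa using h)]

-- appending one line to the prefix updates bBed exactly as A's threaded `if bed == 0` assignment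
theorem bBed_snoc (l : String) : ∀ (pre : List String),
    bBed (pre ++ [l]) =
      if PySem.Str.startswith l "M140" || PySem.Str.startswith l "M190" then
        (if bBed pre == 0 then pvBedScan (pvSplit l " ") else bBed pre)
      else bBed pre
  | [] => by
    simp only [List.nil_append, bBed]
    split_ifs with h1 h2 h3 <;> simp_all
  | line :: pre => by
    have ih := bBed_snoc l pre
    simp only [List.cons_append, bBed]
    generalize hcl : (PySem.Str.startswith l "M140" || PySem.Str.startswith l "M190") = cl at ih ⊢
    generalize hc1 : (PySem.Str.startswith line "M140" || PySem.Str.startswith line "M190") = c1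
    rw [ih]
    cases cl <;> cases c1 <;> split_ifs <;> first | rfl | simp_all

-- appending one line to the prefix updates bTemps by one bTempStep
theorem bTemps_snoc (pre : List String) (l : String) (tidx tn : Int) :
    bTemps (pre ++ [l]) tidx tn =
      bTempStep tidx tn (bTemps pre tidx tn) ((pre.length : Int), l) := by
  unfold bTemps
  rw [PySem.List.enumerate_append, List.foldl_append]
  simp [PySem.List.enumerate_cons, PySem.List.enumerate_nil]

-- while no index of the prefix exceeds tidx, bTemps is empty whatever the default tool is
theorem bTemps_go_empty (tidx tn : Int) (d : PySem.Dict Int Int) :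
    ∀ (pre : List String) (s : Int), s + pre.length ≤ tidx + 1 →
      (PySem.List.enumerate pre s).foldl (bTempStep tidx tn) d = d
  | [], s, _ => by simp [PySem.List.enumerate_nil]
  | line :: pre, s, h => by
    rw [PySem.List.enumerate_cons, List.foldl_cons]
    have hs : ¬ tidx < s := by simp only [List.length_cons] at h; omega
    have : bTempStep tidx tn d (s, line) = d := by
      unfold bTempStep
      rw [if_neg (by simp [hs])]
    rw [this]
    exact bTemps_go_empty tidx tn d pre (s+1) (by simp at h ⊢; omega)

theorem bTemps_empty (pre : List String) (tidx tn : Int) (h : (pre.length : Int) ≤ tidx) :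
    bTemps pre tidx tn = PySem.Dict.empty :=
  bTemps_go_empty tidx tn _ pre 0 (by omega)

-- if line starts with p and p cannot be a prefix of q, line does not start with q
theorem pv_sw_false (line p q : String) (hp : PySem.Str.startswith line p = true)
    (hle : p.toList.length ≤ q.toList.length) (hnp : ¬ p.toList <+: q.toList) :
    PySem.Str.startswith line q = false := by
  cases hq : PySem.Str.startswith line q
  · rfl
  · exfalso
    apply hnp
    rw [PySem.Str.startswith_eq] at hp hq
    exact List.prefix_of_prefix_length_le ((PySem.Chars.startswith_iff _ _).mp hp)
      ((PySem.Chars.startswith_iff _ _).mp hq) hle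

theorem pv_M10x_not_bed (line : String)
    (h : (PySem.Str.startswith line "M104" || PySem.Str.startswith line "M109") = true) :
    (PySem.Str.startswith line "M140" || PySem.Str.startswith line "M190") = false := by
  rcases Bool.or_eq_true_iff.mp h with h1 | h1 <;>
    rw [pv_sw_false line _ "M140" h1 (by decide) (by decide),
        pv_sw_false line _ "M190" h1 (by decide) (by decide)] <;> rfl

theorem pv_T_not_bed (line : String) (h : PySem.Str.startswith line "T" = true) :
    (PySem.Str.startswith line "M140" || PySem.Str.startswith line "M190") = false := by
  rw [pv_sw_false line "T" "M140" h (by decide) (by decide),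
      pv_sw_false line "T" "M190" h (by decide) (by decide)]
  rfl

-- findIdx facts about the first tool-select line at the boundary pre / line
theorem pv_nt_le (pre suf : List String) (line : String)
    (hT : PySem.Str.startswith line "T" = true) :
    (pre ++ line :: suf).findIdx (fun l => PySem.Str.startswith l "T") ≤ pre.length := by
  have hle := List.findIdx_le_length (p := fun l => PySem.Str.startswith l "T") (xs := pre)
  rw [List.findIdx_append, List.findIdx_cons, hT]
  simp only [Bool.cond_true]
  split_ifs with h <;> omega

theorem pv_nt_eq_T (pre suf : List String) (line : String)
    (hnt : (pre ++ line :: suf).findIdx (fun l => PySem.Str.startswith l "T") = pre.length) :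
    PySem.Str.startswith line "T" = true := by
  by_contra hT
  rw [List.findIdx_append, List.findIdx_cons] at hnt
  rw [Bool.not_eq_true] at hT
  rw [hT] at hnt
  simp only [cond_false] at hnt
  split_ifs at hnt <;> omega

theorem pv_getD_boundary (pre suf : List String) (line : String) :
    (pre ++ line :: suf).getD pre.length "" = line := by
  simp [List.getD]

-- the one-line step: A's stateful aStep equals B's stateless classification of line i,
-- with A's state recomputed from the prefix on both sides
theorem pv_step (lines pre suf : List String) (line : String) (lm : List String) (nt : Nat)
    (hl : lines = pre ++ line :: suf)
    (hnt : nt = lines.findIdx (fun l => PySem.Str.startswith l "T")) :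
    aStep ⟨lm, decide (((nt : Nat) : Int) < (pre.length : Int)), bTool lines (nt : Int) (pre.length : Int), bBed pre,
           bTemps pre (nt : Int) (bTool lines (nt : Int) (pre.length : Int))⟩ line
    = ⟨bLineStep lines (nt : Int) lm ((pre.length : Int), line),
       decide (((nt : Nat) : Int) < (pre.length : Int) + 1),
       bTool lines (nt : Int) ((pre.length : Int) + 1),
       bBed (pre ++ [line]),
       bTemps (pre ++ [line]) (nt : Int) (bTool lines (nt : Int) ((pre.length : Int) + 1))⟩ := by
  have hle_of_T : PySem.Str.startswith line "T" = true → nt ≤ pre.length := by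
    intro h; rw [hnt, hl]; exact pv_nt_le pre suf line h
  have hT_of_eq : nt = pre.length → PySem.Str.startswith line "T" = true := by
    intro h; exact pv_nt_eq_T pre suf line (by rw [← hl, ← hnt]; exact h)
  have hget : nt = pre.length → lines.getD nt "" = line := by
    intro h; rw [hl, h]; exact pv_getD_boundary pre suf line
  by_cases hf : nt < pre.length
  · by_cases hM : (PySem.Str.startswith line "M104" || PySem.Str.startswith line "M109") = true
    · have hbed := pv_M10x_not_bed line hM
      have htool : bTool lines (nt:Int) ((pre.length:Int)+1) = bTool lines (nt:Int) (pre.length:Int) := by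
        unfold bTool
        rw [if_pos (show ((nt : Nat) : Int) < (pre.length : Int) + 1 by omega),
            if_pos (show ((nt : Nat) : Int) < (pre.length : Int) by exact_mod_cast hf)]
      simp at hM hbed
      simp [aStep, bLineStep, bTempStep, hf, hM, hbed, htool, bTemps_snoc, pv_setdefault, bBed_snoc]
      omega
    · have hne : ¬ (pre.length = nt) := by omega
      have htool : bTool lines (nt:Int) ((pre.length:Int)+1) = bTool lines (nt:Int) (pre.length:Int) := by
        unfold bTool
        rw [if_pos (show ((nt : Nat) : Int) < (pre.length : Int) + 1 by omega),
            if_pos (show ((nt : Nat) : Int) < (pre.length : Int) by exact_mod_cast hf)]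
      have htake : List.take pre.length lines = pre := by rw [hl]; exact List.take_left
      simp at hM
      simp [aStep, bLineStep, bTempStep, hf, hM, hne, htool, htake, bTemps_snoc, bBed_snoc]
      split_ifs <;> simp_all <;> omega
  · by_cases hT : PySem.Str.startswith line "T" = true
    · have heq' : pre.length = nt := (le_antisymm (hle_of_T hT) (by omega)).symm
      have htool1 : bTool lines (nt:Int) ((pre.length:Int)+1) = pvParseInt (pvTail1 line) := by
        unfold bTool
        rw [if_pos (show ((nt : Nat) : Int) < (pre.length : Int) + 1 by omega)]
        rw [Int.toNat_natCast, hget heq'.symm]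
      have htool2 : bTool lines (nt:Int) ((nt:Int)+1) = pvParseInt (pvTail1 line) := by
        rw [show ((nt:Int)+1) = ((pre.length:Int)+1) by omega]; exact htool1
      have hbed := pv_T_not_bed line hT
      have hempAll : ∀ tn, bTemps pre (nt:Int) tn = PySem.Dict.empty := fun tn =>
        bTemps_empty pre (nt:Int) tn (by omega)
      simp at hT hbed
      simp [aStep, bLineStep, bTempStep, heq', hT, hbed, htool2, hempAll,
        bTemps_snoc, bBed_snoc]
    · have hgt : pre.length < nt := by
        rcases Nat.eq_or_lt_of_le (Nat.le_of_not_lt hf) with h | h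
        · exact absurd (hT_of_eq h.symm) hT
        · exact h
      have hne : ¬ (pre.length = nt) := by omega
      have htool : bTool lines (nt:Int) ((pre.length:Int)+1) = bTool lines (nt:Int) (pre.length:Int) := by
        unfold bTool
        rw [if_neg (show ¬ ((nt : Nat) : Int) < (pre.length : Int) + 1 by omega),
            if_neg (show ¬ ((nt : Nat) : Int) < (pre.length : Int) by omega)]
      have htake : List.take pre.length lines = pre := by rw [hl]; exact List.take_left
      simp at hT
      simp [aStep, bLineStep, bTempStep, hf, hT, hne, htool, htake, bTemps_snoc, bBed_snoc]
      split_ifs <;> simp_all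

-- the main invariant: A's stateful fold over the tail equals B's stateless classification fold,
-- with A's threaded state recomputed from the prefix
theorem pv_inv (lines : List String) : ∀ (suf pre lm : List String),
    lines = pre ++ suf →
    (suf.foldl aStep
      ⟨lm, decide ((lines.findIdx (fun l => PySem.Str.startswith l "T") : Int) < (pre.length : Int)),
        bTool lines (lines.findIdx (fun l => PySem.Str.startswith l "T")) (pre.length : Int),
        bBed pre,
        bTemps pre (lines.findIdx (fun l => PySem.Str.startswith l "T"))
          (bTool lines (lines.findIdx (fun l => PySem.Str.startswith l "T")) (pre.length : Int))⟩).lm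
    = (PySem.List.enumerate suf (pre.length : Int)).foldl
        (bLineStep lines (lines.findIdx (fun l => PySem.Str.startswith l "T"))) lm
  | [], pre, lm, _ => by simp [PySem.List.enumerate_nil]
  | line :: suf, pre, lm, hl => by
    rw [List.foldl_cons, PySem.List.enumerate_cons, List.foldl_cons,
      pv_step lines pre suf line lm _ hl rfl]
    have ih := pv_inv lines suf (pre ++ [line])
      (bLineStep lines (lines.findIdx (fun l => PySem.Str.startswith l "T")) lm
        ((pre.length : Int), line)) (by rw [hl]; simp)
    simp only [List.length_append, List.length_cons, List.length_nil] at ih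
    push_cast at ih
    exact ih


-- "\nM0" ++ "\n" is "\nM0\n"
theorem pv_M0_cat (s : String) : (s ++ "\nM0") ++ "\n" = s ++ "\nM0\n" := by
  rw [String.append_assoc]
  congr 1

-- one-step unfoldings of aGo (rest left opaque so rewriting is controlled)
theorem aGo_nil (n i : Nat) (t b : Int) (tp : PySem.Dict Int Int) :
    aGo n i t b tp [] = some [] := rfl

theorem aGo_zero (n : Nat) (t b : Int) (tp : PySem.Dict Int Int) (layer : String)
    (rest : List String) :
    aGo n 0 t b tp (layer :: rest) =
      if (pvSplit layer "\n").headD "" ≠ ";FLAVOR:Marlin" then none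
      else
        match aGo n 1 t b tp rest with
        | none => none
        | some r => some ((PySem.Str.join "\n" (pvSplit layer "\n") ++ "\n") :: r) := by
  simp only [aGo, if_true, Nat.zero_add]

theorem aGo_one (n : Nat) (t b : Int) (tp : PySem.Dict Int Int) (layer : String)
    (rest : List String) :
    aGo n 1 t b tp (layer :: rest) =
      (match aGo n 2
          ((pvSplit layer "\n").foldl aStep
            ⟨["T-1 ; park any currently active tool"], false, t, b, tp⟩).tool
          ((pvSplit layer "\n").foldl aStep
            ⟨["T-1 ; park any currently active tool"], false, t, b, tp⟩).bed
          ((pvSplit layer "\n").foldl aStep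
            ⟨["T-1 ; park any currently active tool"], false, t, b, tp⟩).temps
          rest with
       | none => none
       | some r =>
         some ((PySem.Str.join "\n"
             ((pvSplit layer "\n").foldl aStep
               ⟨["T-1 ; park any currently active tool"], false, t, b, tp⟩).lm ++ "\n") :: r)) := by
  simp only [aGo, if_neg (show ¬ (1:Nat) = 0 by omega), if_true, Nat.reduceAdd]

theorem aGo_last (n i : Nat) (t b : Int) (tp : PySem.Dict Int Int) (layer : String)
    (rest : List String) (h0 : i ≠ 0) (h1 : i ≠ 1) (h2 : i = n - 1) :
    aGo n i t b tp (layer :: rest) =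
      match aGo n (i+1) t b tp rest with
      | none => none
      | some r => some ((PySem.Str.join "\n" (pvSplit layer "\n" ++ ["M0"]) ++ "\n") :: r) := by
  simp only [aGo, if_neg h0, if_neg h1, if_pos h2]

theorem aGo_mid (n i : Nat) (t b : Int) (tp : PySem.Dict Int Int) (layer : String)
    (rest : List String) (h0 : i ≠ 0) (h1 : i ≠ 1) (h2 : i ≠ n - 1) :
    aGo n i t b tp (layer :: rest) =
      match aGo n (i+1) t b tp rest with
      | none => none
      | some r => some ((PySem.Str.join "\n" (pvSplit layer "\n") ++ "\n") :: r) := by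
  simp only [aGo, if_neg h0, if_neg h1, if_neg h2]

-- tail layers (index >= 2): A's loop produces B's dropLast/getLast? form
theorem pv_tail : ∀ (mids : List String) (i : Nat) (t b : Int) (tp : PySem.Dict Int Int),
    2 ≤ i →
    aGo (i + mids.length) i t b tp mids =
      some (mids.dropLast.map (fun l => l ++ "\n") ++
        (match mids.getLast? with
         | none => []
         | some l => [l ++ "\nM0\n"]))
  | [], i, t, b, tp, hi => rfl
  | [l], i, t, b, tp, hi => by
    rw [aGo_last _ i t b tp l [] (by omega) (by omega) (by simp), aGo_nil,
      pv_join_append_M0, pv_M0_cat]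
    rfl
  | l :: l' :: ls, i, t, b, tp, hi => by
    rw [aGo_mid _ i t b tp l (l' :: ls) (by omega) (by omega) (by simp only [List.length_cons]; omega)]
    have harith : i + (l :: l' :: ls).length = (i+1) + (l' :: ls).length := by simp only [List.length_cons]; omega
    rw [harith, pv_tail (l' :: ls) (i+1) t b tp (by omega)]
    simp [pv_join_split]

-- the invariant at pre = []: A's whole first-layer fold is B's enumerate fold
theorem pv_firstlayer (lines : List String) (lm : List String) :
    (lines.foldl aStep ⟨lm, false, -1, 0, PySem.Dict.empty⟩).lm
    = (PySem.List.enumerate lines).foldl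
        (bLineStep lines (lines.findIdx (fun l => PySem.Str.startswith l "T"))) lm := by
  have h := pv_inv lines lines [] lm (by simp)
  have ht : bTool lines (lines.findIdx (fun l => PySem.Str.startswith l "T")) (([] : List String).length : Int) = -1 := by
    unfold bTool
    rw [if_neg (by simp)]
  rw [ht] at h
  simpa [bBed, bTemps, PySem.List.enumerate_nil] using h

-- ===== VERDICT (by name: the statement is the Claim_ definition above) =====
theorem execute_spec : Claim_equal_execute := by
  unfold Claim_equal_execute Spec_execute
  intro data _ _
  match data with
  | [] => rfl
  | h :: rest =>
    show (match aGo (h :: rest).length 0 (-1) 0 PySem.Dict.empty (h :: rest) with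
          | none => (h :: rest).map (fun x => ";;;;;;\n" ++ x ++ "\n;;;;;;\n")
          | some r => r) = _
    by_cases hdr : (pvSplit h "\n").headD "" = ";FLAVOR:Marlin"
    · rw [aGo_zero, if_neg (by simpa using hdr)]
      match rest with
      | [] =>
        rw [aGo_nil]
        show [PySem.Str.join "\n" (pvSplit h "\n") ++ "\n"] = _
        rw [pv_join_split]
        simp only [execute_alt]
        rw [if_neg (by simpa using hdr)]
      | f :: mids =>
        rw [aGo_one _ _ _ _ f mids]
        have hn : (h :: f :: mids).length = 2 + mids.length := by simp only [List.length_cons]; omega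
        rw [hn, pv_tail mids 2 _ _ _ (by omega), pv_join_split, pv_firstlayer]
        simp only [execute_alt]
        rw [if_neg (by simpa using hdr)]
        rfl
    · rw [aGo_zero, if_pos (by simpa using hdr)]
      show (h :: rest).map (fun x => ";;;;;;\n" ++ x ++ "\n;;;;;;\n") = _
      simp only [execute_alt]
      rw [if_pos (by simpa using hdr)]
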